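-- pv_equiv track=rewrite | github.com/zili11720/sonic-buildimage | platform/mellanox/integration-scripts/hwmgmt_helper.py | parse_inc_exc
-- ===== SOURCE A (Python) =====
-- from typing import OrderedDict
--
-- import copy
--
-- def parse_inc_exc(base: OrderedDict, updated: OrderedDict):
--     # parse the updates/deletions in the Kconfig
--     add, remove = OrderedDict(), copy.deepcopy(base)
--     for (key, val) in updated.items():
--         if val != base.get(key, "empty"):
--             add[key] = val
--         # items remaining in remove are the ones to be excluded
--         if key in remove:
--             del remove[key]
--     return add, remove
-- ===== SOURCE B (Python) =====
-- from typing import OrderedDict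
--
-- import copy
--
-- def parse_inc_exc(base: OrderedDict, updated: OrderedDict):
--     # additions: updated entries whose value differs from the base value
--     add = OrderedDict((k, v) for k, v in updated.items() if v != base.get(k, "empty"))
--     # removals: base entries whose key no longer appears in updated (built
--     # constructively instead of deep-copying base and deleting from it)
--     remove = OrderedDict((k, copy.deepcopy(v)) for k, v in base.items() if k not in updated)
--     return add, remove
-- ===== Notes on version B (the rewrite author's own statement) =====
-- stated objective: simpler
-- what changed: Both halves become single filtered comprehensions: add filters updated.items() directly, and remove is built constructively from base.items() keeping keys absent from updated, instead of deep-copying all of base and deleting keys inside the update loop.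
import Mathlib
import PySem

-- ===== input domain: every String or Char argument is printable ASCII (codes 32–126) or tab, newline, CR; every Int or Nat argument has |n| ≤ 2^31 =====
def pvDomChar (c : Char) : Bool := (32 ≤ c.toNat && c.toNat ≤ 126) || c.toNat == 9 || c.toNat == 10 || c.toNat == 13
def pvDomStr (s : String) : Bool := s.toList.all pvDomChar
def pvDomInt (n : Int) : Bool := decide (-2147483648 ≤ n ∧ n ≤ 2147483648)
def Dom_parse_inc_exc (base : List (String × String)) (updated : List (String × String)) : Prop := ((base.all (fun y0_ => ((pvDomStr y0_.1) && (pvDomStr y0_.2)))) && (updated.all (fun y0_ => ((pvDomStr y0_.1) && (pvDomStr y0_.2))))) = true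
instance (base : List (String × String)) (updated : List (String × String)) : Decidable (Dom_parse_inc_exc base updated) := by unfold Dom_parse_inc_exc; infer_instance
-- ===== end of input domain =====

-- B builds `add` and `remove` as single filtered passes (add over updated, remove
-- constructively over base) instead of deep-copying base and deleting inside the loop;
-- objective: simpler.


-- ===== PORT A =====
-- add, remove = OrderedDict(), deepcopy(base); for (key, val) in updated.items():
--   if val != base.get(key, "empty"): add[key] = val;  if key in remove: del remove[key]
def parse_inc_exc (base : List (String × String)) (updated : List (String × String)) : (List (String × String)) × (List (String × String)) :=
  let st := updated.foldl
    (fun (st : PySem.Dict String String × PySem.Dict String String) kv =>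
      (if kv.2 != PySem.Dict.getD (PySem.Dict.mk base) kv.1 "empty" then st.1.insert kv.1 kv.2 else st.1,
       if st.2.contains kv.1 then st.2.erase kv.1 else st.2))
    (PySem.Dict.empty, PySem.Dict.mk base)
  (st.1.items, st.2.items)

-- ===== PORT B =====
-- add = updated entries with changed value; remove = base entries whose key ∉ updated
def parse_inc_exc_alt (base : List (String × String)) (updated : List (String × String)) : (List (String × String)) × (List (String × String)) :=
  (updated.filter (fun kv => kv.2 != PySem.Dict.getD (PySem.Dict.mk base) kv.1 "empty"),
   base.filter (fun kv => !((PySem.Dict.mk updated).contains kv.1)))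

-- ===== PRECONDITION & SPEC =====
-- Pre_ is the dict representation invariant: `updated` (a Python dict) has distinct keys.
-- Python dicts cannot contain duplicate keys, so no input the Python A accepts is excluded.
def Pre_parse_inc_exc (base : List (String × String)) (updated : List (String × String)) : Prop :=
  (updated.map Prod.fst).Nodup
instance (base : List (String × String)) (updated : List (String × String)) : Decidable (Pre_parse_inc_exc base updated) := by unfold Pre_parse_inc_exc; infer_instance
def pvWitness_parse_inc_exc : (List (String × String)) × (List (String × String)) :=
  ([("a", "1"), ("b", "2")], [("a", "3"), ("c", "4")])
def Spec_parse_inc_exc (base : List (String × String)) (updated : List (String × String)) (out : (List (String × String)) × (List (String × String))) : Prop := out = parse_inc_exc_alt base updated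
instance (base : List (String × String)) (updated : List (String × String)) (out : (List (String × String)) × (List (String × String))) : Decidable (Spec_parse_inc_exc base updated out) := by unfold Spec_parse_inc_exc; infer_instance

-- ===== CLAIM (what is proved, stated in full; the proofs are below) =====
def Claim_equal_parse_inc_exc : Prop := ∀ (base : List (String × String)) (updated : List (String × String)), Dom_parse_inc_exc base updated → Pre_parse_inc_exc base updated → Spec_parse_inc_exc base updated (parse_inc_exc base updated)

-- ===== LEMMAS AND PROOFS =====

-- a foldl whose state is a pair updated componentwise splits into two foldls
theorem pv_foldl_pair {α β γ : Type} (l : List α) (f : β → α → β) (g : γ → α → γ)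
    (b : β) (c : γ) :
    l.foldl (fun st x => (f st.1 x, g st.2 x)) (b, c) = (l.foldl f b, l.foldl g c) := by
  induction l generalizing b c with
  | nil => rfl
  | cons x xs ih => simpa using ih (f b x) (g c x)

-- the `remove` loop of A: successive deletions leave exactly the entries whose key
-- does not occur in l (no key-uniqueness needed: erase filters out every occurrence)
theorem pv_remove_loop (l : List (String × String)) (d : PySem.Dict String String) :
    (l.foldl (fun r kv => if r.contains kv.1 then r.erase kv.1 else r) d).items
      = d.items.filter (fun kv => !((PySem.Dict.mk l).contains kv.1)) := by
  induction l generalizing d with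
  | nil =>
    simp [PySem.Dict.contains]
  | cons u us ih =>
    have hstep : (if d.contains u.1 then d.erase u.1 else d).items
        = d.items.filter (fun kv => !(kv.1 == u.1)) := by
      by_cases h : d.contains u.1 = true
      · simp [h, PySem.Dict.erase]
      · rw [if_neg h]
        symm
        rw [List.filter_eq_self]
        intro kv hkv
        cases hb : (kv.1 == u.1) with
        | false => simp
        | true =>
          exact absurd (by simp only [PySem.Dict.contains, List.any_eq_true]
                           exact ⟨kv, hkv, hb⟩) h
    rw [List.foldl_cons, ih, hstep, List.filter_filter]
    apply List.filter_congr
    intro kv _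
    simp [PySem.Dict.contains, Bool.and_comm, BEq.comm]

-- the `add` loop of A: inserting along keys that are distinct and fresh for d appends
theorem pv_add_loop (cond : String × String → Bool) (l : List (String × String))
    (d : PySem.Dict String String)
    (hnd : (l.map Prod.fst).Nodup) (hfresh : ∀ kv ∈ l, d.contains kv.1 = false) :
    (l.foldl (fun a kv => if cond kv then a.insert kv.1 kv.2 else a) d).items
      = d.items ++ l.filter cond := by
  induction l generalizing d with
  | nil => simp
  | cons u us ih =>
    simp only [List.map_cons, List.nodup_cons, List.mem_map] at hnd
    obtain ⟨hu, hnd'⟩ := hnd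
    have hfresh_u : d.contains u.1 = false := hfresh u (List.mem_cons_self)
    by_cases hc : cond u = true
    · have hitems : (d.insert u.1 u.2).items = d.items ++ [(u.1, u.2)] :=
        PySem.Dict.items_insert_of_not_contains _ _ hfresh_u
      have hfresh2 : ∀ kv ∈ us, (d.insert u.1 u.2).contains kv.1 = false := by
        intro kv hkv
        rw [PySem.Dict.contains_insert]
        have hne : ¬ (kv.1 == u.1) = true := by
          intro hh
          exact hu ⟨kv, hkv, eq_of_beq hh⟩
        simp [hfresh kv (List.mem_cons_of_mem _ hkv), Bool.eq_false_iff.mpr hne]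
      rw [List.foldl_cons, if_pos hc, ih _ hnd' hfresh2, hitems, List.filter_cons_of_pos hc]
      simp
    · rw [List.foldl_cons, if_neg hc, ih _ hnd' (fun kv hkv => hfresh kv (List.mem_cons_of_mem _ hkv)),
        List.filter_cons_of_neg (by simpa using hc)]

-- ===== VERDICT (by name: the statement is the Claim_ definition above) =====
theorem parse_inc_exc_spec : Claim_equal_parse_inc_exc := by
  intro base updated _ hpre
  unfold Spec_parse_inc_exc parse_inc_exc parse_inc_exc_alt
  have h1 :
      List.foldl
        (fun (st : PySem.Dict String String × PySem.Dict String String) (kv : String × String) =>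
          (if kv.2 != PySem.Dict.getD (PySem.Dict.mk base) kv.1 "empty" then st.1.insert kv.1 kv.2 else st.1,
           if st.2.contains kv.1 then st.2.erase kv.1 else st.2))
        (PySem.Dict.empty, PySem.Dict.mk base) updated
      = (List.foldl (fun (a : PySem.Dict String String) (kv : String × String) =>
            if kv.2 != PySem.Dict.getD (PySem.Dict.mk base) kv.1 "empty" then a.insert kv.1 kv.2 else a)
          PySem.Dict.empty updated,
         List.foldl (fun (r : PySem.Dict String String) (kv : String × String) =>
            if r.contains kv.1 then r.erase kv.1 else r)
          (PySem.Dict.mk base) updated) :=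
    pv_foldl_pair updated
      (fun (a : PySem.Dict String String) (kv : String × String) =>
        if kv.2 != PySem.Dict.getD (PySem.Dict.mk base) kv.1 "empty" then a.insert kv.1 kv.2 else a)
      (fun (r : PySem.Dict String String) (kv : String × String) =>
        if r.contains kv.1 then r.erase kv.1 else r)
      PySem.Dict.empty (PySem.Dict.mk base)
  simp only []
  rw [h1]
  refine Prod.ext ?_ ?_
  · simpa using
      pv_add_loop (fun kv => kv.2 != PySem.Dict.getD (PySem.Dict.mk base) kv.1 "empty")
        updated PySem.Dict.empty hpre (fun kv _ => PySem.Dict.contains_empty _)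
  · simpa using pv_remove_loop updated (PySem.Dict.mk base)
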